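-- pv_equiv track=rewrite | github.com/kumarkontham/leetcode_practice | subarray_count.py | sub_rray_count
-- ===== SOURCE A (Python) =====
-- def sub_rray_count(arr):
--     n=len(arr)
--     count=0
--     for i in range(n):
--         for j in range(i,n):
--             sub=arr[i:j+1]
--             curr_len=j-i+1
--             if curr_len in sub:
--                 count+=1
--     return count
-- ===== SOURCE B (Python) =====
-- def sub_rray_count(arr):
--     # Enumerate witnesses instead of windows: each position p with value v marks
--     # the starts s of the length-v windows that contain p; dedupe windows in a set.
--     n = len(arr)
--     wins = set()
--     for p, v in enumerate(arr):
--         if 1 <= v <= n: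
--             for s in range(max(0, p - v + 1), min(p, n - v) + 1):
--                 wins.add((v, s))
--     return len(wins)
-- ===== Notes on version B (the rewrite author's own statement) =====
-- stated objective: faster
-- what changed: Instead of scanning every window and testing membership via a slice, B enumerates for each position p with value v the starts of the length-v windows containing p and deduplicates windows in a set.
import Mathlib
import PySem

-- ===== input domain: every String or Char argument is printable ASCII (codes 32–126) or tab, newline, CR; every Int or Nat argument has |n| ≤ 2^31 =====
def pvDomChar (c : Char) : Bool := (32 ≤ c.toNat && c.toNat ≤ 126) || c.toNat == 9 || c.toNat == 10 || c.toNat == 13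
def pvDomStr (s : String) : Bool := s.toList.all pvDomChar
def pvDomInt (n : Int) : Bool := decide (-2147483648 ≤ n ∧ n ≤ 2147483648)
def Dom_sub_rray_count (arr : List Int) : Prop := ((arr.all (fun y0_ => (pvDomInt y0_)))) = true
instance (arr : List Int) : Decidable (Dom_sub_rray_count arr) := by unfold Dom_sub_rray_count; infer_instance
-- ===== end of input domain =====

-- B replaces A's cubic scan of all windows (slice + membership test per window) by enumerating,
-- for each position p holding value v, the starts of the length-v windows containing p,
-- deduplicating windows in a set; return values proved equal on the whole domain.

-- ===== PORT A =====
def sub_rray_count (arr : List Int) : Int :=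
  let n : Int := PySem.List.len arr
  (PySem.List.pyRange 0 n).foldl (fun count i =>
    (PySem.List.pyRange i n).foldl (fun count j =>
      let sub := PySem.List.slice arr (some i) (some (j + 1))
      let curr_len := j - i + 1
      if curr_len ∈ sub then count + 1 else count) count) 0

-- ===== PORT B =====
def sub_rray_count_alt (arr : List Int) : Int :=
  let n : Int := PySem.List.len arr
  let wins : PySem.Set (Int × Int) :=
    (PySem.List.enumerate arr).foldl (fun wins pv =>
      if 1 ≤ pv.2 ∧ pv.2 ≤ n then
        (PySem.List.pyRange (max 0 (pv.1 - pv.2 + 1)) (min pv.1 (n - pv.2) + 1)).foldl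
          (fun w s => PySem.Set.add w (pv.2, s)) wins
      else wins) PySem.Set.empty
  PySem.Set.len wins

-- ===== PRECONDITION & SPEC =====
def Spec_sub_rray_count (arr : List Int) (out : Int) : Prop := out = sub_rray_count_alt arr
instance (arr : List Int) (out : Int) : Decidable (Spec_sub_rray_count arr out) := by unfold Spec_sub_rray_count; infer_instance

-- ===== CLAIM (what is proved, stated in full; the proofs are below) =====
def Claim_equal_sub_rray_count : Prop := ∀ (arr : List Int), Dom_sub_rray_count arr → Spec_sub_rray_count arr (sub_rray_count arr)

-- ===== LEMMAS AND PROOFS =====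

def pvGood (arr : List Int) (w : Int × Int) : Prop :=
  ∃ p : Nat, arr[p]? = some w.1 ∧ w.2 ≤ (p : Int) ∧ (p : Int) ≤ w.2 + w.1 - 1 ∧
    0 ≤ w.2 ∧ w.2 + w.1 ≤ (arr.length : Int)
def pvM (arr : List Int) : List (Int × Int) :=
  (PySem.List.pyRange 0 (arr.length : Int)).flatMap (fun i =>
    ((PySem.List.pyRange i (arr.length : Int)).filter
      (fun j => decide ((j - i + 1) ∈ PySem.List.slice arr (some i) (some (j + 1))))).map (fun j => (j - i + 1, i)))

def pvW (arr : List Int) : PySem.Set (Int × Int) :=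
  (PySem.List.enumerate arr).foldl (fun wins pv =>
    if 1 ≤ pv.2 ∧ pv.2 ≤ (arr.length : Int) then
      (PySem.List.pyRange (max 0 (pv.1 - pv.2 + 1)) (min pv.1 ((arr.length : Int) - pv.2) + 1)).foldl
        (fun w s => PySem.Set.add w (pv.2, s)) wins
    else wins) PySem.Set.empty

lemma pv_mem_take_drop (l : List Int) (a k : Nat) (x : Int) :
    x ∈ (l.drop a).take k ↔ ∃ p : Nat, a ≤ p ∧ p < a + k ∧ l[p]? = some x := by
  simp only [List.mem_iff_getElem, List.length_take, List.length_drop, List.getElem_take,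
    List.getElem_drop]
  constructor
  · rintro ⟨q, hq, hx⟩
    exact ⟨a + q, by omega, by omega, by rw [List.getElem?_eq_getElem (by omega)]; simp [hx]⟩
  · rintro ⟨p, hap, hpk, hx⟩
    have hlt : p < l.length := by
      by_contra h
      rw [List.getElem?_eq_none (by omega)] at hx; simp at hx
    refine ⟨p - a, by omega, ?_⟩
    rw [List.getElem?_eq_getElem hlt] at hx
    have : a + (p - a) = p := by omega
    simp only [this]
    exact Option.some.inj hx

lemma pv_mem_slice (arr : List Int) (a b : Nat) (x : Int) :
    x ∈ PySem.List.slice arr (some (a : Int)) (some (b : Int)) ↔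
      ∃ p : Nat, a ≤ p ∧ p < b ∧ arr[p]? = some x := by
  rw [PySem.List.slice_natCast, pv_mem_take_drop]
  constructor
  · rintro ⟨p, h1, h2, h3⟩; exact ⟨p, h1, by omega, h3⟩
  · rintro ⟨p, h1, h2, h3⟩; exact ⟨p, h1, by omega, h3⟩

lemma pv_mem_slice_int (arr : List Int) (i j : Int) (hi : 0 ≤ i) (hj : 0 ≤ j) (x : Int) :
    x ∈ PySem.List.slice arr (some i) (some j) ↔
      ∃ p : Nat, i ≤ (p : Int) ∧ (p : Int) < j ∧ arr[p]? = some x := by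
  lift i to ℕ using hi
  lift j to ℕ using hj
  rw [pv_mem_slice]
  constructor
  · rintro ⟨p, h1, h2, h3⟩; exact ⟨p, by omega, by omega, h3⟩
  · rintro ⟨p, h1, h2, h3⟩; exact ⟨p, by omega, by omega, h3⟩

lemma pv_mem_M (arr : List Int) (w : Int × Int) : w ∈ pvM arr ↔ pvGood arr w := by
  unfold pvM pvGood
  simp only [List.mem_flatMap, List.mem_map, List.mem_filter, PySem.List.mem_pyRange_one,
    decide_eq_true_eq]
  constructor
  · rintro ⟨i, ⟨hi0, hin⟩, j, ⟨⟨hij, hjn⟩, hmem⟩, rfl⟩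
    obtain ⟨p, hp1, hp2, hp3⟩ := (pv_mem_slice_int arr i (j + 1) hi0 (by omega) _).1 hmem
    exact ⟨p, hp3, by omega, by omega, by omega, by omega⟩
  · rintro ⟨p, hval, hsp, hpe, hs0, hsn⟩
    have hplen : p < arr.length := (List.getElem?_eq_some_iff.1 hval).1
    refine ⟨w.2, ⟨hs0, by omega⟩, w.2 + w.1 - 1, ⟨⟨by omega, by omega⟩, ?_⟩, by
      have h1 : w.2 + w.1 - 1 - w.2 + 1 = w.1 := by ring
      rw [h1]⟩
    · rw [pv_mem_slice_int arr _ _ hs0 (by omega)]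
      refine ⟨p, hsp, by omega, ?_⟩
      have : w.2 + w.1 - 1 - w.2 + 1 = w.1 := by ring
      rw [this, hval]

lemma pv_nodup_M (arr : List Int) : (pvM arr).Nodup := by
  unfold pvM
  rw [List.nodup_flatMap]
  constructor
  · intro i _
    refine List.Nodup.map ?_ ((PySem.List.nodup_pyRange_one _ _).filter _)
    intro a b hab
    simpa using hab
  · refine (PySem.List.nodup_pyRange_one 0 (arr.length : Int)).imp ?_
    intro a b hab w hwa hwb
    simp only [List.mem_map] at hwa hwb
    obtain ⟨j, _, rfl⟩ := hwa
    obtain ⟨j', _, h⟩ := hwb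
    have := congrArg Prod.snd h
    simp at this
    exact hab this.symm

lemma pv_A_eq (arr : List Int) : sub_rray_count arr = ((pvM arr).length : Int) := by
  unfold sub_rray_count
  simp only [PySem.List.len]
  rw [PySem.List.foldl_congr_mem _ _
    (fun c i => c + (((PySem.List.pyRange i (arr.length : Int)).countP
      (fun j => decide ((j - i + 1) ∈ PySem.List.slice arr (some i) (some (j + 1)))) : Nat) : Int)) 0
    (fun c i _ => PySem.List.foldl_ite_add_one
      (fun j => (j - i + 1) ∈ PySem.List.slice arr (some i) (some (j + 1))) _ c)]
  rw [PySem.List.foldl_add]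
  unfold pvM
  rw [List.length_flatMap, Nat.cast_list_sum, List.map_map]
  simp [Function.comp_def, ← List.countP_eq_length_filter]

lemma pv_B_eq (arr : List Int) : sub_rray_count_alt arr = ((pvW arr).length : Int) := by
  rfl

lemma pv_mem_foldl_step {β : Type} (P : β → Int × Int → Prop)
    (F : PySem.Set (Int × Int) → β → PySem.Set (Int × Int))
    (h : ∀ s b y, y ∈ F s b ↔ y ∈ s ∨ P b y) :
    ∀ (l : List β) (s : PySem.Set (Int × Int)) (y : Int × Int),
      y ∈ l.foldl F s ↔ y ∈ s ∨ ∃ b ∈ l, P b y := by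
  intro l
  induction l with
  | nil => simp
  | cons b t ih =>
    intro s y
    rw [List.foldl_cons, ih, h]
    constructor
    · rintro (h1 | h2)
      · rcases h1 with h1 | h1
        · exact Or.inl h1
        · exact Or.inr ⟨b, by simp, h1⟩
      · obtain ⟨c, hc, hp⟩ := h2
        exact Or.inr ⟨c, by simp [hc], hp⟩
    · rintro (h1 | ⟨c, hc, hp⟩)
      · exact Or.inl (Or.inl h1)
      · rcases List.mem_cons.1 hc with rfl | hct
        · exact Or.inl (Or.inr hp)
        · exact Or.inr ⟨c, hct, hp⟩

lemma pv_nodup_foldl_step {β : Type}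
    (F : PySem.Set (Int × Int) → β → PySem.Set (Int × Int))
    (h : ∀ s b, List.Nodup s → List.Nodup (F s b)) :
    ∀ (l : List β) (s : PySem.Set (Int × Int)), List.Nodup s → List.Nodup (l.foldl F s) := by
  intro l
  induction l with
  | nil => intro s hs; exact hs
  | cons b t ih => intro s hs; exact ih _ (h s b hs)

lemma pv_nodup_W (arr : List Int) : (pvW arr).Nodup := by
  unfold pvW
  refine pv_nodup_foldl_step _ ?_ _ _ List.nodup_nil
  intro s b hs
  split
  · exact pv_nodup_foldl_step _ (fun s c hs => PySem.Set.nodup_add s _ hs) _ _ hs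
  · exact hs

lemma pv_mem_W (arr : List Int) (w : Int × Int) : w ∈ pvW arr ↔ pvGood arr w := by
  unfold pvW
  rw [pv_mem_foldl_step
    (fun pv y => (1 ≤ pv.2 ∧ pv.2 ≤ (arr.length : Int)) ∧
      ∃ s ∈ PySem.List.pyRange (max 0 (pv.1 - pv.2 + 1)) (min pv.1 ((arr.length : Int) - pv.2) + 1),
        y = (pv.2, s)) _ ?_]
  · rw [PySem.List.enumerate_eq_map_pyRange arr 0]
    constructor
    · rintro (h | ⟨b, hb, ⟨hv1, hv2⟩, s, hs, rfl⟩)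
      · simp [PySem.Set.empty] at h
      · simp only [List.mem_map, PySem.List.mem_pyRange_one] at hb
        obtain ⟨j, ⟨hj0, hjn⟩, rfl⟩ := hb
        rw [PySem.List.mem_pyRange_one] at hs
        lift j to ℕ using hj0 with q
        refine ⟨q, ?_, by simp at hs ⊢; omega, by simp at hs ⊢; omega, by simp at hs ⊢; omega,
          by simp at hs hv2 ⊢; omega⟩
        have hqlen : q < arr.length := by simp [PySem.List.len] at hjn; exact_mod_cast hjn
        rw [List.getElem?_eq_getElem hqlen]
        simp [PySem.List.pyGetD_natCast, List.getD_eq_getElem?_getD, List.getElem?_eq_getElem hqlen]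
    · rintro ⟨p, hval, hsp, hpe, hs0, hsn⟩
      have hplen : p < arr.length := (List.getElem?_eq_some_iff.1 hval).1
      refine Or.inr ⟨((p : Int), w.1), ?_, ⟨by omega, by omega⟩, w.2, ?_, by rw [Prod.mk.eta]⟩
      · simp only [List.mem_map, PySem.List.mem_pyRange_one]
        refine ⟨(p : Int), ⟨by omega, by simp [PySem.List.len]; exact_mod_cast hplen⟩, ?_⟩
        rw [PySem.List.pyGetD_natCast]
        rw [List.getD_eq_getElem?_getD, hval]
        simp
      · rw [PySem.List.mem_pyRange_one]
        constructor <;> simp <;> omega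
  · intro s b y
    split
    · rename_i hcond
      rw [pv_mem_foldl_step (fun c y => y = (b.2, c)) _ (fun s c y => PySem.Set.mem_add s (b.2, c) y)]
      constructor
      · rintro (h | ⟨c, hc, rfl⟩)
        · exact Or.inl h
        · exact Or.inr ⟨hcond, c, hc, rfl⟩
      · rintro (h | ⟨_, c, hc, rfl⟩)
        · exact Or.inl h
        · exact Or.inr ⟨c, hc, rfl⟩
    · rename_i hcond
      constructor
      · exact Or.inl
      · rintro (h | ⟨hc, _⟩)
        · exact h
        · exact absurd hc hcond

-- ===== VERDICT (by name: the statement is the Claim_ definition above) =====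
theorem sub_rray_count_spec : Claim_equal_sub_rray_count := by
  intro arr _
  unfold Spec_sub_rray_count
  rw [pv_A_eq, pv_B_eq]
  have hperm : (pvM arr).Perm (pvW arr) :=
    (List.perm_ext_iff_of_nodup (pv_nodup_M arr) (pv_nodup_W arr)).2
      (fun w => (pv_mem_M arr w).trans (pv_mem_W arr w).symm)
  rw [hperm.length_eq]
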